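-- pv_equiv track=rewrite | github.com/varsha-gumbarthi/practiced_problems | special_fibonacci.py | alex
-- ===== SOURCE A (Python) =====
-- def alex(n):
--     if n==0 or n==1:
--         return 1
--     f0, f1 = 1, 1
--     for i in range (2,n+1):
--         fn=(f1*f1+f0*f0)%47
--         f0, f1=f1,fn
--     return fn
-- ===== SOURCE B (Python) =====
-- # O(1) reimplementation: the state (f0, f1) lives in a finite space mod 47, so the
-- # sequence is eventually periodic.  Precomputed: values f_0..f_56; the cycle of
-- # length 24 starts at index 33 (f_{k+24} = f_k for all k >= 33).
-- _TABLE = [1, 1, 2, 5, 29, 20, 19, 9, 19, 19, 17, 39, 24, 29, 7, 44, 11, 36, 7,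
--           29, 44, 4, 25, 30, 21, 25, 32, 4, 6, 5, 14, 33, 16, 29, 16, 16, 42,
--           46, 26, 19, 3, 41, 45, 40, 6, 38, 23, 46, 13, 29, 23, 7, 14, 10, 14,
--           14, 16]
--
-- def alex(n):
--     if n < 33:
--         return _TABLE[n]
--     return _TABLE[33 + (n - 33) % 24]
-- ===== Notes on version B (the rewrite author's own statement) =====
-- stated objective: faster
-- what changed: Replaces the n-step iteration of fn=(f1^2+f0^2)%47 by an O(1) lookup into the precomputed eventually-periodic sequence (pre-period 33, cycle length 24), proved correct by a periodicity lemma.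
import Mathlib
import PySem

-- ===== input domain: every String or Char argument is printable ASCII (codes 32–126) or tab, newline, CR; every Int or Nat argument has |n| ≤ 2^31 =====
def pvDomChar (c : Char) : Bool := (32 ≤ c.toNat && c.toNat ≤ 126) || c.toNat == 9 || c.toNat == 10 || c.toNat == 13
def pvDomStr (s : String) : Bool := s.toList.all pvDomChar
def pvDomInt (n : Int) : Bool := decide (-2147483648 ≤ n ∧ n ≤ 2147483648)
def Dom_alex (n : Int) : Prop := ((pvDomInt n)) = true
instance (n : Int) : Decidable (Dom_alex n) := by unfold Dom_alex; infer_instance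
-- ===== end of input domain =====

-- B is an O(1) table lookup into the precomputed eventually-periodic sequence mod 47 (pre-period 33, period 24).

-- ===== PORT A =====
-- loop body of A: fn = (f1*f1 + f0*f0) % 47; f0, f1 = f1, fn  (state (f0, f1, fn))
def alexStep (p : Int × Int × Int) : Int × Int × Int :=
  let fn := PySem.Int.mod (p.2.1 * p.2.1 + p.1 * p.1) 47
  (p.2.1, fn, fn)

def alex (n : Int) : Int :=
  if n = 0 ∨ n = 1 then 1
  else ((PySem.List.pyRange 2 (n + 1) 1).foldl (fun p _ => alexStep p) (1, 1, 0)).2.2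

-- ===== PORT B =====
def alexTable : List Int :=
  [1, 1, 2, 5, 29, 20, 19, 9, 19, 19, 17, 39, 24, 29, 7, 44, 11, 36, 7,
   29, 44, 4, 25, 30, 21, 25, 32, 4, 6, 5, 14, 33, 16, 29, 16, 16, 42,
   46, 26, 19, 3, 41, 45, 40, 6, 38, 23, 46, 13, 29, 23, 7, 14, 10, 14,
   14, 16]

def alex_alt (n : Int) : Int :=
  if n < 33 then PySem.List.pyGetD alexTable n 0
  else PySem.List.pyGetD alexTable (33 + PySem.Int.mod (n - 33) 24) 0

-- ===== PRECONDITION & SPEC =====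
-- A raises UnboundLocalError for n < 0 (the loop never runs and fn is unbound).
def Pre_alex (n : Int) : Prop := 0 ≤ n
instance (n : Int) : Decidable (Pre_alex n) := by unfold Pre_alex; infer_instance
def pvWitness_alex : Int := 5

def Spec_alex (n : Int) (out : Int) : Prop := out = alex_alt n
instance (n : Int) (out : Int) : Decidable (Spec_alex n out) := by unfold Spec_alex; infer_instance

-- ===== CLAIM (what is proved, stated in full; the proofs are below) =====
def Claim_equal_alex : Prop := ∀ (n : Int), Dom_alex n → Pre_alex n → Spec_alex n (alex n)

-- ===== LEMMAS AND PROOFS =====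

-- the recurrence on states (f_k, f_{k+1})
def fnext (p : Int × Int) : Int × Int :=
  (p.2, PySem.Int.mod (p.2 * p.2 + p.1 * p.1) 47)

def fs (k : Nat) : Int × Int := fnext^[k] (1, 1)

def Fv (k : Nat) : Int := (fs k).2

theorem fs_succ (k : Nat) : fs (k + 1) = fnext (fs k) := by
  simp [fs, Function.iterate_succ_apply']

theorem foldl_const {α β : Type} (g : β → β) (l : List α) (p : β) :
    l.foldl (fun q _ => g q) p = g^[l.length] p := by
  induction l generalizing p with
  | nil => rfl
  | cons a t ih => simp [List.foldl, ih, Function.iterate_succ_apply]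

theorem iterate_step (m : Nat) :
    alexStep^[m + 1] ((1 : Int), (1 : Int), (0 : Int))
      = ((fs (m + 1)).1, (fs (m + 1)).2, (fs (m + 1)).2) := by
  induction m with
  | zero => decide
  | succ m ih =>
      rw [Function.iterate_succ_apply', ih]
      simp [alexStep, fs_succ, fnext]

theorem alex_eq_Fv (n : Int) (h : 2 ≤ n) : alex n = Fv ((n - 1).toNat) := by
  have hne : ¬ (n = 0 ∨ n = 1) := by omega
  have hlen : (PySem.List.pyRange 2 (n + 1) 1).length = (n - 2).toNat + 1 := by
    rw [PySem.List.length_pyRange_one]; omega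
  have h2 : (n - 1).toNat = (n - 2).toNat + 1 := by omega
  simp only [alex, if_neg hne, foldl_const, hlen, iterate_step, Fv, h2]

set_option maxRecDepth 10000 in
theorem fs_period_base : fs 56 = fs 32 := by decide

theorem fs_period (j : Nat) : fs (32 + j + 24) = fs (32 + j) := by
  induction j with
  | zero => exact fs_period_base
  | succ j ih =>
      have e1 : 32 + (j + 1) + 24 = (32 + j + 24) + 1 := by omega
      have e2 : 32 + (j + 1) = (32 + j) + 1 := by omega
      rw [e1, e2, fs_succ, ih, ← fs_succ]


theorem Fv_mod (t : Nat) : Fv (32 + t) = Fv (32 + t % 24) := by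
  induction t using Nat.strong_induction_on with
  | _ t ih =>
    by_cases h : t < 24
    · rw [Nat.mod_eq_of_lt h]
    · have e : 32 + t = 32 + (t - 24) + 24 := by omega
      have e2 : t % 24 = (t - 24) % 24 := by omega
      rw [e, e2, Fv, fs_period, ← Fv, ih (t - 24) (by omega)]

-- table[k] = f_k, i.e. Fv (k-1) for k ≥ 1 (and 1 at k = 0)
theorem table_spec : ∀ k : Nat, k < 57 →
    alexTable[k]? = some (if k = 0 then 1 else Fv (k - 1)) := by decide

theorem table_get (k : Nat) (h1 : 1 ≤ k) (h2 : k < 57) :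
    PySem.List.pyGetD alexTable (k : Int) 0 = Fv (k - 1) := by
  have h := table_spec k h2
  have hk : ¬ k = 0 := by omega
  rw [if_neg hk] at h
  rw [PySem.List.pyGetD_natCast, List.getD_eq_getElem?_getD, h]
  rfl

-- ===== VERDICT (by name: the statement is the Claim_ definition above) =====
theorem alex_spec : Claim_equal_alex := by
  intro n _ hpre
  unfold Spec_alex
  by_cases h01 : n = 0 ∨ n = 1
  · rcases h01 with h | h <;> subst h <;> decide
  · have h2 : 2 ≤ n := by unfold Pre_alex at hpre; omega
    rw [alex_eq_Fv n h2]
    by_cases h33 : n < 33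
    · -- B: direct table lookup
      have hc : (n : Int) = ((n.toNat : Nat) : Int) := by omega
      rw [alex_alt, if_pos h33, hc, table_get n.toNat (by omega) (by omega)]
      congr 1; omega
    · -- B: cycle lookup
      have ht : (n - 33) = ((n.toNat - 33 : Nat) : Int) := by omega
      rw [alex_alt, if_neg h33, ht]
      rw [show PySem.Int.mod ((n.toNat - 33 : Nat) : Int) 24
            = (((n.toNat - 33) % 24 : Nat) : Int) from by
        exact_mod_cast PySem.Int.mod_natCast (n.toNat - 33) 24]
      rw [show (33 : Int) + (((n.toNat - 33) % 24 : Nat) : Int)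
            = ((33 + (n.toNat - 33) % 24 : Nat) : Int) from by push_cast; ring]
      rw [table_get _ (by omega) (by have := Nat.mod_lt (n.toNat - 33) (y := 24) (by omega); omega)]
      have e1 : (n - 1).toNat = 32 + (n.toNat - 33) := by omega
      have e2 : 33 + (n.toNat - 33) % 24 - 1 = 32 + (n.toNat - 33) % 24 := by
        have := Nat.mod_lt (n.toNat - 33) (y := 24) (by omega); omega
      rw [e1, e2, Fv_mod]
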